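-- pv_equiv track=rewrite | github.com/alexanderdfox/ForkTrust-vs-Zero-Trust | simulation.py | collatz_sequence
-- ===== SOURCE A (Python) =====
-- def collatz_sequence(n):
-- 	steps = 0
-- 	peak = n
-- 	while n != 1:
-- 		n = n // 2 if n % 2 == 0 else 3 * n + 1
-- 		peak = max(peak, n)
-- 		steps += 1
-- 	return steps, peak
-- ===== SOURCE B (Python) =====
-- def collatz_sequence(n):
-- 	if n == 1:
-- 		return 0, 1
-- 	k = (n & -n).bit_length() - 1  # number of trailing halvings available
-- 	m = n >> k                      # odd part of n
-- 	if m == 1: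
-- 		return k, n
-- 	s, p = collatz_sequence(3 * m + 1)
-- 	return s + k + 1, max(n, p)
-- ===== Notes on version B (the rewrite author's own statement) =====
-- stated objective: alternative
-- what changed: B replaces A's one-step-at-a-time while loop by a recursion over odd steps: each run of consecutive halvings is consumed in one shot via a trailing-zero count on the bits of n ((n & -n).bit_length() - 1 and a shift), and the peak is combined on the way back out of the recursion; the per-step loop disappears.
-- outside the precondition, e.g. on collatz_sequence(0): A does not finish within the time limit, B raises ValueError
import Mathlib
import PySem

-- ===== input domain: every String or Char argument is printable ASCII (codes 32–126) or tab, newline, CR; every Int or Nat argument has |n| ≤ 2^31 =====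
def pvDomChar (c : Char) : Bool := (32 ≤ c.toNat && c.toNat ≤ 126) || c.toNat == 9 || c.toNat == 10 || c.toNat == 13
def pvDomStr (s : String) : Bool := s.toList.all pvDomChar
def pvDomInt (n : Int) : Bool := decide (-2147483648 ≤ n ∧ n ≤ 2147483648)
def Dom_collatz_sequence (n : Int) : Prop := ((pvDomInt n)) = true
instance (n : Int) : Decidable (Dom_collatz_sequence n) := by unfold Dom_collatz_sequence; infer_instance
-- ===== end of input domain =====

-- B replaces A's one-step-at-a-time while loop by a recursion over odd steps that consumes
-- each run of halvings in one shot via a trailing-zero count (objective: alternative).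
-- Both ports carry a fuel bound only to totalise the recursion (fuel counts Collatz steps
-- in both, and the exhaustion defaults agree); neither Python has such a bound.

-- ===== PORT A =====
def pvStep (n : Int) : Int :=
  if PySem.Int.mod n 2 = 0 then PySem.Int.floordiv n 2 else 3 * n + 1

def collatzLoopA : Nat → Int → Int → Int → Int × Int
  | 0, _, steps, peak => (steps, peak)
  | f + 1, n, steps, peak =>
    if n ≠ 1 then
      let n' := pvStep n
      collatzLoopA f n' (steps + 1) (max peak n')
    else (steps, peak)

def collatz_sequence (n : Int) : Int × Int := collatzLoopA 1000000 n 0 n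

-- ===== PORT B =====
-- trailing-zero count: the port of '(n & -n).bit_length() - 1' for positive n
def pvCtz (n : Nat) : Nat :=
  if h : n % 2 = 0 ∧ n ≠ 0 then pvCtz (n / 2) + 1 else 0
decreasing_by exact Nat.div_lt_self (Nat.pos_of_ne_zero h.2) one_lt_two

def collatzGoB (f : Nat) (n : Int) : Int × Int :=
  if n = 1 then (0, 1)
  else
    let k := pvCtz n.toNat
    if _h : f ≤ k then ((f : Int), n)  -- fuel exhaustion only; Python B has no such branch
    else
      let m : Int := ((n.toNat >>> k : Nat) : Int)  -- odd part of n, 'n >> k'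
      if m = 1 then ((k : Int), n)
      else
        let r := collatzGoB (f - (k + 1)) (3 * m + 1)
        (r.1 + (k : Int) + 1, max n r.2)
termination_by f
decreasing_by omega

def collatz_sequence_alt (n : Int) : Int × Int := collatzGoB 1000000 n

-- ===== PRECONDITION & SPEC =====
-- A's while loop never terminates for n ≤ 0 (0 → 0 → …, -1 → -2 → -1 → …), so A returns
-- a value exactly on n ≥ 1; Pre_ admits exactly those inputs.
def Pre_collatz_sequence (n : Int) : Prop := 1 ≤ n
instance (n : Int) : Decidable (Pre_collatz_sequence n) := by unfold Pre_collatz_sequence; infer_instance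
def pvWitness_collatz_sequence : Int := 6

def Spec_collatz_sequence (n : Int) (out : Int × Int) : Prop := out = collatz_sequence_alt n
instance (n : Int) (out : Int × Int) : Decidable (Spec_collatz_sequence n out) := by unfold Spec_collatz_sequence; infer_instance

-- ===== CLAIM (what is proved, stated in full; the proofs are below) =====
def Claim_equal_collatz_sequence : Prop := ∀ (n : Int), Dom_collatz_sequence n → Pre_collatz_sequence n → Spec_collatz_sequence n (collatz_sequence n)

-- ===== LEMMAS AND PROOFS =====

theorem pvCtz_odd (n : Nat) (h : n % 2 = 1) : pvCtz n = 0 := by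
  rw [pvCtz]; simp [h]

theorem pvCtz_even (n : Nat) (h : n % 2 = 0) (h0 : n ≠ 0) : pvCtz n = pvCtz (n / 2) + 1 := by
  rw [pvCtz]; simp [h, h0]

-- B's peak is at least the starting value
theorem goB_snd_ge (f : Nat) (n : Int) : n ≤ (collatzGoB f n).2 := by
  rw [collatzGoB]
  by_cases h1 : n = 1
  · simp [h1]
  · simp only [if_neg h1]
    by_cases h2 : f ≤ pvCtz n.toNat
    · simp [h2]
    · simp only [dif_neg h2]
      by_cases h3 : ((n.toNat >>> pvCtz n.toNat : Nat) : Int) = 1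
      · simp [h3]
      · simp only [if_neg h3]
        exact le_max_left _ _

-- peeling ONE halving off B's recursion (the k-fold run seen one step at a time)
theorem goB_even (g : Nat) (n : Int) (h2 : 2 ≤ n) (he : n % 2 = 0) :
    collatzGoB (g + 1) n =
      ((collatzGoB g (n / 2)).1 + 1, max n (collatzGoB g (n / 2)).2) := by
  have hne : n ≠ 1 := by omega
  have hN2 : n.toNat % 2 = 0 := by omega
  have hN0 : n.toNat ≠ 0 := by omega
  have hhalf : (n / 2).toNat = n.toNat / 2 := by omega
  have hk : pvCtz n.toNat = pvCtz ((n / 2).toNat) + 1 := by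
    rw [pvCtz_even _ hN2 hN0, hhalf]
  have hm : n.toNat >>> (pvCtz ((n / 2).toNat) + 1) = (n / 2).toNat >>> pvCtz ((n / 2).toNat) := by
    rw [Nat.shiftRight_eq_div_pow, Nat.shiftRight_eq_div_pow, hhalf, pow_succ,
      mul_comm, ← Nat.div_div_eq_div_mul]
  have hmax : max n (n / 2) = n := by omega
  by_cases hn2 : n = 2
  · subst hn2
    have h1 : (2 : Int) / 2 = 1 := by norm_num
    rw [h1]
    have hgo1 : collatzGoB g 1 = (0, 1) := by rw [collatzGoB]; simp
    have c1 : pvCtz 1 = 0 := by rw [pvCtz]; simp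
    have c2 : pvCtz 2 = 1 := by rw [pvCtz_even 2 rfl (by omega)]; simp [c1]
    rw [hgo1]
    cases g with
    | zero => rw [collatzGoB]; simp [c2]
    | succ g => rw [collatzGoB]; simp [c2, Nat.shiftRight_eq_div_pow]
  · have hn4 : 4 ≤ n := by omega
    have hne2 : n / 2 ≠ 1 := by omega
    by_cases hg : g ≤ pvCtz ((n / 2).toNat)
    · have hL : collatzGoB (g + 1) n = (((g + 1 : Nat) : Int), n) := by
        rw [collatzGoB]; simp only [if_neg hne]; rw [hk]
        rw [dif_pos (by omega : g + 1 ≤ pvCtz ((n / 2).toNat) + 1)]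
      have hR : collatzGoB g (n / 2) = (((g : Nat) : Int), n / 2) := by
        rw [collatzGoB]; simp only [if_neg hne2]; rw [dif_pos hg]
      rw [hL, hR]
      refine Prod.ext ?_ ?_ <;> simp [hmax]
    · by_cases hM1 : (((n / 2).toNat >>> pvCtz ((n / 2).toNat) : Nat) : Int) = 1
      · have hL : collatzGoB (g + 1) n = (((pvCtz ((n / 2).toNat) + 1 : Nat) : Int), n) := by
          rw [collatzGoB]; simp only [if_neg hne]; rw [hk]
          rw [dif_neg (by omega : ¬ g + 1 ≤ pvCtz ((n / 2).toNat) + 1)]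
          rw [hm, if_pos hM1]
        have hR : collatzGoB g (n / 2) = (((pvCtz ((n / 2).toNat) : Nat) : Int), n / 2) := by
          rw [collatzGoB]; simp only [if_neg hne2]; rw [dif_neg hg, if_pos hM1]
        rw [hL, hR]
        refine Prod.ext ?_ ?_ <;> simp [hmax]
      · have hidx : g + 1 - (pvCtz ((n / 2).toNat) + 1 + 1) = g - (pvCtz ((n / 2).toNat) + 1) := by
          omega
        have hL : collatzGoB (g + 1) n =
            ((collatzGoB (g - (pvCtz ((n / 2).toNat) + 1))
                (3 * (((n / 2).toNat >>> pvCtz ((n / 2).toNat) : Nat) : Int) + 1)).1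
              + ((pvCtz ((n / 2).toNat) + 1 : Nat) : Int) + 1,
             max n (collatzGoB (g - (pvCtz ((n / 2).toNat) + 1))
                (3 * (((n / 2).toNat >>> pvCtz ((n / 2).toNat) : Nat) : Int) + 1)).2) := by
          rw [collatzGoB]; simp only [if_neg hne]; rw [hk]
          rw [dif_neg (by omega : ¬ g + 1 ≤ pvCtz ((n / 2).toNat) + 1)]
          rw [hm, if_neg hM1, hidx]
        have hR : collatzGoB g (n / 2) =
            ((collatzGoB (g - (pvCtz ((n / 2).toNat) + 1))
                (3 * (((n / 2).toNat >>> pvCtz ((n / 2).toNat) : Nat) : Int) + 1)).1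
              + ((pvCtz ((n / 2).toNat) : Nat) : Int) + 1,
             max (n / 2) (collatzGoB (g - (pvCtz ((n / 2).toNat) + 1))
                (3 * (((n / 2).toNat >>> pvCtz ((n / 2).toNat) : Nat) : Int) + 1)).2) := by
          rw [collatzGoB]; simp only [if_neg hne2]; rw [dif_neg hg, if_neg hM1]
        rw [hL, hR]
        refine Prod.ext ?_ ?_
        · push_cast; ring
        · simp only [← max_assoc, hmax]

-- the simulation invariant: A's loop computes B's recursion plus A's accumulators
theorem loopA_eq_goB (f : Nat) : ∀ (n steps peak : Int), 1 ≤ n → n ≤ peak →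
    collatzLoopA f n steps peak =
      (steps + (collatzGoB f n).1, max peak (collatzGoB f n).2) := by
  induction f with
  | zero =>
    intro n steps peak h1 hp
    by_cases hn : n = 1
    · subst hn
      rw [show collatzGoB 0 1 = (0, 1) by rw [collatzGoB]; simp]
      simp [collatzLoopA, max_eq_left hp]
    · rw [show collatzGoB 0 n = (0, n) by
        rw [collatzGoB]; simp only [if_neg hn]; rw [dif_pos (Nat.zero_le _)]; simp]
      simp [collatzLoopA, max_eq_left hp]
  | succ g ih =>
    intro n steps peak h1 hp
    by_cases hn : n = 1
    · subst hn
      rw [show collatzGoB (g + 1) 1 = (0, 1) by rw [collatzGoB]; simp]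
      simp [collatzLoopA, max_eq_left hp]
    · by_cases hpar : n % 2 = 0
      · -- even step
        have hstep : pvStep n = n / 2 := by
          unfold pvStep
          rw [PySem.Int.mod_eq_emod_of_pos (by omega), PySem.Int.floordiv_eq_ediv_of_pos (by omega)]
          simp [hpar]
        have hA : collatzLoopA (g + 1) n steps peak
            = collatzLoopA g (n / 2) (steps + 1) (max peak (n / 2)) := by
          simp [collatzLoopA, hn, hstep]
        have hpk : max peak (n / 2) = peak := max_eq_left (by omega)
        rw [hA, hpk, ih (n / 2) (steps + 1) peak (by omega) (by omega),
          goB_even g n (by omega) hpar]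
        refine Prod.ext ?_ ?_
        · simp; ring
        · simp only [← max_assoc, max_eq_left hp]
      · -- odd step
        have hpar' : n % 2 = 1 := by omega
        have hstep : pvStep n = 3 * n + 1 := by
          unfold pvStep
          rw [PySem.Int.mod_eq_emod_of_pos (by omega)]
          simp [hpar']
        have hA : collatzLoopA (g + 1) n steps peak
            = collatzLoopA g (3 * n + 1) (steps + 1) (max peak (3 * n + 1)) := by
          simp [collatzLoopA, hn, hstep]
        have hk0 : pvCtz n.toNat = 0 := pvCtz_odd n.toNat (by omega)
        have hB : collatzGoB (g + 1) n
            = ((collatzGoB g (3 * n + 1)).1 + (0 : Nat) + 1,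
               max n (collatzGoB g (3 * n + 1)).2) := by
          rw [collatzGoB]; simp only [if_neg hn]; rw [hk0]
          rw [dif_neg (by omega : ¬ g + 1 ≤ 0)]
          rw [show ((n.toNat >>> 0 : Nat) : Int) = n by rw [Nat.shiftRight_zero]; omega]
          rw [if_neg hn]
          simp
        have hge : 3 * n + 1 ≤ (collatzGoB g (3 * n + 1)).2 :=
          goB_snd_ge g (3 * n + 1)
        rw [hA, ih (3 * n + 1) (steps + 1) (max peak (3 * n + 1)) (by omega) (le_max_right _ _),
          hB]
        refine Prod.ext ?_ ?_
        · simp; ring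
        · simp only [max_assoc, max_eq_right hge, max_eq_right (le_trans (by omega : n ≤ 3 * n + 1) hge)]

-- ===== VERDICT (by name: the statement is the Claim_ definition above) =====
theorem collatz_sequence_spec : Claim_equal_collatz_sequence := by
  intro n _ hpre
  have h := loopA_eq_goB 1000000 n 0 n hpre le_rfl
  have h2 := goB_snd_ge 1000000 n
  unfold Spec_collatz_sequence collatz_sequence collatz_sequence_alt
  rw [h]
  exact Prod.ext (by simp) (by simp [max_eq_right h2])
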